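-- pv_equiv track=rewrite | github.com/ClawBio/ClawBio | skills/article-data-fetcher/article_data_fetcher.py | file_matches_types
-- ===== SOURCE A (Python) =====
-- def file_matches_types(filename: str, types: set[str]) -> bool:
--     if "all" in types:
--         return True
--     name_lower = filename.lower()
--     for t in types:
--         if name_lower.endswith(f".{t}"):
--             return True
--     return False
-- ===== SOURCE B (Python) =====
-- def file_matches_types(filename: str, types: set[str]) -> bool:
--     if "all" in types:
--         return True
--     s = filename.lower()
--     while s:
--         c, s = s[0], s[1:]
--         if c == "." and s in types:
--             return True
--     return False
-- ===== Notes on version B (the rewrite author's own statement) =====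
-- stated objective: alternative
-- what changed: B scans the filename's characters and at each '.' checks the remaining suffix for set membership, instead of looping over the type list and testing endswith for each type.
import Mathlib
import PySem

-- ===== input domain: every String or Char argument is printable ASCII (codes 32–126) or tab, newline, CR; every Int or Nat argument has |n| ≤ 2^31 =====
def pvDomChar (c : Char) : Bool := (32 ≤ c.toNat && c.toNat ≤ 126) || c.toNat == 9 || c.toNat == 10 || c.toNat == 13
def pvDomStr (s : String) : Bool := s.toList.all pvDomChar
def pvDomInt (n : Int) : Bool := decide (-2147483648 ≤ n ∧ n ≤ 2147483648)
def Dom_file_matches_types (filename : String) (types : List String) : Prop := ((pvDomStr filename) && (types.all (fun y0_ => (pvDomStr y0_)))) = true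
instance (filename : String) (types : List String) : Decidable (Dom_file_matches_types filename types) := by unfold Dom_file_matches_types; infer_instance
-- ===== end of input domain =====

-- B scans the filename's dot positions and checks suffix membership in the type set,
-- instead of testing endswith for every type; same result, alternative structure.

-- ===== PORT A =====
def file_matches_types (filename : String) (types : List String) : Bool :=
  if types.contains "all" then true
  else
    let name_lower := PySem.Str.lower filename
    types.any (fun t => PySem.Str.endswith name_lower ("." ++ t))

-- ===== PORT B =====
-- B's while loop over the string, peeling one character per step.
def fmtScan (types : List String) : List Char → Bool
  | [] => false
  | c :: rest => ((c == '.') && types.contains (String.ofList rest)) || fmtScan types rest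

def file_matches_types_alt (filename : String) (types : List String) : Bool :=
  if types.contains "all" then true
  else fmtScan types (PySem.Str.lower filename).toList

-- ===== PRECONDITION & SPEC =====
def Spec_file_matches_types (filename : String) (types : List String) (out : Bool) : Prop := out = file_matches_types_alt filename types
instance (filename : String) (types : List String) (out : Bool) : Decidable (Spec_file_matches_types filename types out) := by unfold Spec_file_matches_types; infer_instance

-- ===== CLAIM (what is proved, stated in full; the proofs are below) =====
def Claim_equal_file_matches_types : Prop := ∀ (filename : String) (types : List String), Dom_file_matches_types filename types → Spec_file_matches_types filename types (file_matches_types filename types)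

-- ===== LEMMAS AND PROOFS =====

theorem fmtScan_true_iff (types : List String) (l : List Char) :
    fmtScan types l = true ↔ ∃ t ∈ types, ('.' :: t.toList) <:+ l := by
  induction l with
  | nil => simp [fmtScan]
  | cons c rest ih =>
    simp only [fmtScan, Bool.or_eq_true, Bool.and_eq_true, beq_iff_eq,
      List.contains_eq_mem, decide_eq_true_eq, ih, List.suffix_cons_iff]
    constructor
    · rintro (⟨rfl, hm⟩ | ⟨t, ht, hs⟩)
      · exact ⟨String.ofList rest, hm, Or.inl (by rw [String.toList_ofList])⟩
      · exact ⟨t, ht, Or.inr hs⟩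
    · rintro ⟨t, ht, (heq | hs)⟩
      · obtain ⟨hc, hrest⟩ := List.cons.inj heq
        refine Or.inl ⟨hc.symm, ?_⟩
        have heq2 : String.ofList rest = t := by rw [← hrest, String.ofList_toList]
        exact heq2 ▸ ht
      · exact Or.inr ⟨t, ht, hs⟩

theorem file_matches_types_spec : Claim_equal_file_matches_types := by
  intro filename types _
  unfold Spec_file_matches_types file_matches_types file_matches_types_alt
  by_cases h : types.contains "all" = true
  · rw [if_pos h, if_pos h]
  · rw [if_neg h, if_neg h]
    apply Bool.eq_iff_iff.mpr
    rw [fmtScan_true_iff, List.any_eq_true]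
    constructor
    · rintro ⟨t, ht, he⟩
      refine ⟨t, ht, ?_⟩
      have := (PySem.Chars.endswith_iff ((PySem.Str.lower filename).toList) (("." ++ t).toList)).mp
        (by simpa using he)
      simpa using this
    · rintro ⟨t, ht, hs⟩
      refine ⟨t, ht, ?_⟩
      have := (PySem.Chars.endswith_iff ((PySem.Str.lower filename).toList) (("." ++ t).toList)).mpr
        (by simpa using hs)
      simpa using this
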